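-- pv_equiv track=rewrite | github.com/huggingface/finepdfs | postprocessing/tables.py | has_empty_column
-- ===== SOURCE A (Python) =====
-- from typing import List, Optional
--
-- def has_empty_column(rows: List[List[str]]) -> bool:
--     """Check if any column is completely empty"""
--     if not rows:
--         return True
--
--     num_cols = len(rows[0]) if rows else 0
--     for col_idx in range(num_cols):
--         if all(row[col_idx].strip() == '' for row in rows if col_idx < len(row)):
--             return True
--     return False
-- ===== SOURCE B (Python) =====
-- def has_empty_column(rows):
--     if not rows:
--         return True
--     num_cols = len(rows[0])
--     seen = [False] * num_cols
--     for row in rows: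
--         for col in range(min(num_cols, len(row))):
--             if row[col].strip():
--                 seen[col] = True
--     return any(not s for s in seen)
-- ===== Notes on version B (the rewrite author's own statement) =====
-- stated objective: alternative
-- what changed: Replaces A's column-major scan (for each column, re-scan all rows with an all()) by a single row-major pass that marks a per-column 'seen non-blank' table, followed by a final any() over the table.
import Mathlib
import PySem

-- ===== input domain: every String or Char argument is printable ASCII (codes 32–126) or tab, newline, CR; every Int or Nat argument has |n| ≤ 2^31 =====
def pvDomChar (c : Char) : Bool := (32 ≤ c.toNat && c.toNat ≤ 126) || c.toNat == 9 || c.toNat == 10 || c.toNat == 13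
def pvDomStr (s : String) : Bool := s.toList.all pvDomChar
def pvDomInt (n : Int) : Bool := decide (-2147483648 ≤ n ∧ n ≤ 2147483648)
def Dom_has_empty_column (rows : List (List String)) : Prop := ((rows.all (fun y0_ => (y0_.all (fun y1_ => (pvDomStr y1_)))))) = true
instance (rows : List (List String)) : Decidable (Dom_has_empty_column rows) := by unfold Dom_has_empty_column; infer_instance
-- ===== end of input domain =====

-- B is an alternative decomposition: one row-major pass building a per-column table instead of A's per-column rescans. Equivalence is about the return value; neither mutates its argument.

-- ===== PORT A =====
-- A: for each column index below len(rows[0]), re-scan all rows; True if some column is blank in every row that reaches it.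
def has_empty_column (rows : List (List String)) : Bool :=
  if rows.isEmpty then true
  else
    let num_cols := if rows.isEmpty then 0 else (rows.headD []).length
    (List.range num_cols).any (fun col_idx =>
      rows.all (fun row =>
        if col_idx < row.length then PySem.Str.strip (row.getD col_idx "") == "" else true))

-- ===== PORT B =====
-- B: one pass over rows marking seen[col] for non-blank cells, then any(not s).
def has_empty_column_alt (rows : List (List String)) : Bool :=
  match rows with
  | [] => true
  | r0 :: _ =>
    let num_cols := r0.length
    let seen :=
      rows.foldl (fun seen row =>
        (List.range (min num_cols row.length)).foldl
          (fun s col => if PySem.Str.strip (row.getD col "") == "" then s else s.set col true)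
          seen)
        (List.replicate num_cols false)
    seen.any (fun s => !s)

-- ===== PRECONDITION & SPEC =====
def Spec_has_empty_column (rows : List (List String)) (out : Bool) : Prop := out = has_empty_column_alt rows
instance (rows : List (List String)) (out : Bool) : Decidable (Spec_has_empty_column rows out) := by unfold Spec_has_empty_column; infer_instance

-- ===== CLAIM (what is proved, stated in full; the proofs are below) =====
def Claim_equal_has_empty_column : Prop := ∀ (rows : List (List String)), Dom_has_empty_column rows → Spec_has_empty_column rows (has_empty_column rows)

-- ===== LEMMAS AND PROOFS =====

-- inner loop: marking positions below m; length is preserved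
theorem inner_length (f : Nat → Bool) (m : Nat) (s : List Bool) :
    ((List.range m).foldl (fun s col => if f col then s else s.set col true) s).length = s.length := by
  induction m generalizing s with
  | zero => simp
  | succ m ih =>
      rw [List.range_succ, List.foldl_append]
      simp only [List.foldl_cons, List.foldl_nil]
      split <;> simp [ih]

-- inner loop: pointwise characterisation via getD
theorem inner_getD (f : Nat → Bool) (m : Nat) (s : List Bool) (hm : m ≤ s.length) (c : Nat) :
    ((List.range m).foldl (fun s col => if f col then s else s.set col true) s).getD c false
      = (s.getD c false || (decide (c < m) && !f c)) := by
  induction m generalizing s with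
  | zero => simp
  | succ m ih =>
      rw [List.range_succ, List.foldl_append]
      simp only [List.foldl_cons, List.foldl_nil]
      have hlen := inner_length f m s
      have hm' : m ≤ s.length := by omega
      by_cases hf : f m
      · rw [if_pos hf, ih s hm']
        by_cases hc : c = m
        · subst hc; simp [hf]
        · rw [show (decide (c < m + 1) : Bool) = decide (c < m) from by
            simp only [decide_eq_decide]; omega]
      · rw [if_neg hf]
        by_cases hc : c = m
        · subst hc
          rw [List.getD_eq_getElem?_getD, List.getElem?_set_self (by omega)]
          simp [hf]
        · rw [List.getD_eq_getElem?_getD, List.getElem?_set_ne (fun h => hc h.symm),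
              ← List.getD_eq_getElem?_getD, ih s hm',
              show (decide (c < m + 1) : Bool) = decide (c < m) from by
                simp only [decide_eq_decide]; omega]

-- outer loop: length preserved
theorem outer_length (n : Nat) (rows : List (List String)) (s : List Bool) :
    (rows.foldl (fun seen row =>
        (List.range (min n row.length)).foldl
          (fun s col => if PySem.Str.strip (row.getD col "") == "" then s else s.set col true) seen) s).length
      = s.length := by
  induction rows generalizing s with
  | nil => rfl
  | cons r rs ih => simp only [List.foldl_cons]; rw [ih, inner_length]

-- outer loop: pointwise characterisation
theorem outer_getD (n : Nat) (rows : List (List String)) (s : List Bool) (hs : s.length = n) (c : Nat) :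
    (rows.foldl (fun seen row =>
        (List.range (min n row.length)).foldl
          (fun s col => if PySem.Str.strip (row.getD col "") == "" then s else s.set col true) seen) s).getD c false
      = (s.getD c false
          || rows.any (fun row => decide (c < min n row.length) && !(PySem.Str.strip (row.getD c "") == ""))) := by
  induction rows generalizing s with
  | nil => simp
  | cons r rs ih =>
      simp only [List.foldl_cons, List.any_cons]
      rw [ih _ (by rw [inner_length]; exact hs),
          inner_getD _ _ _ (by rw [hs]; exact Nat.min_le_left _ _)]
      simp [Bool.or_assoc]

-- not-any as all-not (local helper)
theorem not_any_eq_all_not {α : Type} (l : List α) (p : α → Bool) :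
    (!l.any p) = l.all (fun x => !p x) := by
  induction l with
  | nil => rfl
  | cons a t ih => simp [List.any_cons, List.all_cons, ih]

-- congruence for all over members (local helper)
theorem list_all_congr_mem {α : Type} {l : List α} {f g : α → Bool} (h : ∀ x ∈ l, f x = g x) :
    l.all f = l.all g := by
  induction l with
  | nil => rfl
  | cons a t ih =>
      simp only [List.all_cons, h a (List.mem_cons_self), ih (fun x hx => h x (List.mem_cons_of_mem a hx))]

-- any over a Bool list of known length, via getD over range
theorem any_eq_range_any (l : List Bool) :
    l.any (fun s => !s) = (List.range l.length).any (fun c => !(l.getD c false)) := by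
  induction l with
  | nil => simp
  | cons a t ih =>
      simp only [List.any_cons, List.length_cons, List.range_succ_eq_map, List.any_cons,
        List.any_map]
      rw [ih]
      simp [Function.comp_def]

-- ===== VERDICT (by name: the statement is the Claim_ definition above) =====
theorem has_empty_column_spec : Claim_equal_has_empty_column := by
  intro rows _
  unfold Spec_has_empty_column has_empty_column has_empty_column_alt
  cases rows with
  | nil => rfl
  | cons r0 rs =>
      simp only [List.isEmpty_cons, Bool.false_eq_true, if_false, List.headD_cons]
      have hlen : ((r0 :: rs).foldl (fun seen row =>
          (List.range (min r0.length row.length)).foldl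
            (fun s col => if PySem.Str.strip (row.getD col "") == "" then s else s.set col true) seen)
          (List.replicate r0.length false)).length = r0.length := by
        rw [outer_length]; simp
      rw [any_eq_range_any, hlen]
      apply PySem.List.any_congr_mem
      intro c hc
      rw [List.mem_range] at hc
      rw [outer_getD _ _ _ (by simp) c]
      rw [List.getD_replicate, Bool.false_or, not_any_eq_all_not]
      apply list_all_congr_mem
      intro row _
      by_cases h : c < row.length
      · have h2 : c < min r0.length row.length := by omega
        simp only [if_pos h, decide_eq_true h2, Bool.true_and, Bool.not_not]
      · have h2 : ¬ c < min r0.length row.length := by omega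
        simp only [if_neg h, decide_eq_false h2, Bool.false_and, Bool.not_false]
      exact hc
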